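-- pv_equiv track=rewrite | github.com/BogdanovychA/karatel-game | karatel/logic/next_number.py | power_sequence
-- ===== SOURCE A (Python) =====
-- def power_sequence(base: int, power: int, length: int) -> tuple[int, ...]:
--     """Послідовність степенів числа"""
--     if length <= 0:
--         raise ValueError("length має бути > 0")
--     if base <= 1:
--         raise ValueError("base має бути > 1")
--     if power <= 0:
--         raise ValueError("power має бути > 0")
--     return tuple(base ** (power * i) for i in range(1, length + 1))
-- ===== SOURCE B (Python) =====
-- def power_sequence(base: int, power: int, length: int) -> tuple[int, ...]:
--     """Послідовність степенів числа"""
--     if length <= 0: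
--         raise ValueError("length має бути > 0")
--     if base <= 1:
--         raise ValueError("base має бути > 1")
--     if power <= 0:
--         raise ValueError("power має бути > 0")
--     step = base ** power
--     out = []
--     cur = 1
--     for _ in range(length):
--         cur *= step
--         out.append(cur)
--     return tuple(out)
-- ===== Notes on version B (the rewrite author's own statement) =====
-- stated objective: alternative
-- what changed: Computes base**power once and builds each term by one multiplication from the previous term, instead of evaluating base**(power*i) from scratch for every i; intended as faster (measured 6.33x at the largest size both finished, unconfirmed at larger sizes where both time out).
import Mathlib
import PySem

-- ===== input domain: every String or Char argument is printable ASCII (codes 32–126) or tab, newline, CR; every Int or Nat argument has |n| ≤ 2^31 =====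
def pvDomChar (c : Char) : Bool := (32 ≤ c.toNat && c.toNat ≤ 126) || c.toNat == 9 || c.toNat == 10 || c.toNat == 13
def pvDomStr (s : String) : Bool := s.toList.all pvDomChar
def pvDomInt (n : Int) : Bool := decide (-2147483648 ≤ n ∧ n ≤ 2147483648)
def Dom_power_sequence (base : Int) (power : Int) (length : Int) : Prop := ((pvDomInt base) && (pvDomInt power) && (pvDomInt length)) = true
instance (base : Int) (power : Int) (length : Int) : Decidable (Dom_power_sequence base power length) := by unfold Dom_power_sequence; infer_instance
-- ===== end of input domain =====

-- B computes base**power once and extends each term by one multiplication (intended as faster; timing run measured 6.33x at the largest size both programs finished, unconfirmed beyond); equivalence proved for length>0, base>1, power>0 (A raises otherwise).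


-- ===== PORT A =====
-- exact under Pre_: the exponent power*i is positive there, so Python's ** is integer and equals ^ on toNat
def power_sequence (base : Int) (power : Int) (length : Int) : List Int :=
  (PySem.List.pyRange 1 (length + 1) 1).map (fun i => base ^ (power * i).toNat)

-- ===== PORT B =====
def power_sequence_alt (base : Int) (power : Int) (length : Int) : List Int :=
  let step := base ^ power.toNat
  ((List.range length.toNat).foldl
    (fun (p : List Int × Int) _ => (p.1 ++ [p.2 * step], p.2 * step)) ([], (1 : Int))).1

-- ===== PRECONDITION & SPEC =====
-- A raises ValueError unless length > 0, base > 1 and power > 0.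
def Pre_power_sequence (base : Int) (power : Int) (length : Int) : Prop :=
  0 < length ∧ 1 < base ∧ 0 < power
instance (base : Int) (power : Int) (length : Int) : Decidable (Pre_power_sequence base power length) := by unfold Pre_power_sequence; infer_instance
def pvWitness_power_sequence : Int × Int × Int := (2, 3, 4)
def Spec_power_sequence (base : Int) (power : Int) (length : Int) (out : List Int) : Prop := out = power_sequence_alt base power length
instance (base : Int) (power : Int) (length : Int) (out : List Int) : Decidable (Spec_power_sequence base power length out) := by unfold Spec_power_sequence; infer_instance

-- ===== CLAIM (what is proved, stated in full; the proofs are below) =====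
def Claim_equal_power_sequence : Prop := ∀ (base : Int) (power : Int) (length : Int), Dom_power_sequence base power length → Pre_power_sequence base power length → Spec_power_sequence base power length (power_sequence base power length)

-- ===== LEMMAS AND PROOFS =====

lemma psAlt_loop (step : Int) : ∀ (n : Nat) (acc : List Int) (c : Int),
    (List.range n).foldl (fun (p : List Int × Int) _ => (p.1 ++ [p.2 * step], p.2 * step)) (acc, c)
      = (acc ++ (List.range n).map (fun k => c * step ^ (k + 1)), c * step ^ n) := by
  intro n
  induction n with
  | zero => simp
  | succ n ih =>
    intro acc c
    rw [List.range_succ, List.foldl_append, ih]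
    simp [mul_assoc, pow_succ]

lemma psA_term (base power : Int) (hp : 0 < power) (k : Nat) :
    base ^ (power * (1 + (k : Int))).toNat = (base ^ power.toNat) ^ (k + 1) := by
  have h : power * (1 + (k : Int)) = ((power.toNat * (k + 1) : Nat) : Int) := by
    have := Int.toNat_of_nonneg hp.le
    push_cast
    rw [this]; ring
  rw [h, Int.toNat_natCast, ← pow_mul]

-- ===== VERDICT (by name: the statement is the Claim_ definition above) =====
theorem power_sequence_spec : Claim_equal_power_sequence := by
  intro base power length _ ⟨hl, _, hp⟩
  show _ = _
  rw [power_sequence, power_sequence_alt]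
  rw [PySem.List.pyRange_one, psAlt_loop]
  simp only [List.nil_append, List.map_map, one_mul]
  have hlen : ((length + 1 - 1).toNat) = length.toNat := by omega
  rw [hlen]
  apply List.map_congr_left
  intro k _
  simp [Function.comp, psA_term base power hp k]
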